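-- pv_equiv track=rewrite | github.com/Xotrab/modelowanieBiznesowe | backend/model.py | get_direct_successions
-- ===== SOURCE A (Python) =====
-- def get_direct_successions(traces):
--   successions = { }
--   for trace in traces:
--     prev_event = None
--     for event in trace:
--       if event not in successions:
--         successions[event] = set()
--       if prev_event != None:
--         successions[prev_event].add(event)
--       prev_event = event
--
--   to_remove = []
--   for key in successions:
--     if len(successions[key]) == 0:
--       to_remove.append(key)
--
--   for key in to_remove:
--     del successions[key]
--
--   return successions
-- ===== SOURCE B (Python) =====
-- def get_direct_successions(traces):
--     # Per-key scan: list distinct events in first-occurrence order, then for each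
--     # event gather its direct successors by a fresh scan over all traces.
--     events = []
--     seen = set()
--     for trace in traces:
--         for e in trace:
--             if e not in seen:
--                 seen.add(e)
--                 events.append(e)
--     result = {}
--     for a in events:
--         succs = set()
--         for trace in traces:
--             for x, y in zip(trace, trace[1:]):
--                 if x == a:
--                     succs.add(y)
--         if succs:
--             result[a] = succs
--     return result
-- ===== Notes on version B (the rewrite author's own statement) =====
-- stated objective: alternative
-- what changed: B replaces A's single streaming pass (insert an empty set for every event, stream edges into the sets, then remove empty keys) by a per-key decomposition: it first lists the distinct events in first-occurrence order, then for each event runs a fresh scan over all traces collecting that event's direct successors, keeping only events with a nonempty set; no shared successor dict is built and no removal pass exists.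
import Mathlib
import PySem

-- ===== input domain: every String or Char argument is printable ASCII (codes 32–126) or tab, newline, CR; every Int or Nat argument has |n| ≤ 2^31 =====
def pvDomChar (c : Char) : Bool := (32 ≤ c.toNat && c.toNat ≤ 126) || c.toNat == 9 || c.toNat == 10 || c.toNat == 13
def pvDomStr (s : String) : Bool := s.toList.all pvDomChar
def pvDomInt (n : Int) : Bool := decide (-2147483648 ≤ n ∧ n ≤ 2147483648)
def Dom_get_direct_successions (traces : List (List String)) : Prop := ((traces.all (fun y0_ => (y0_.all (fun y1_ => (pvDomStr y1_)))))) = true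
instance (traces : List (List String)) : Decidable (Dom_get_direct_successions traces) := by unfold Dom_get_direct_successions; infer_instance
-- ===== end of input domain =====

-- B replaces A's single streaming pass (build empty sets for every event, stream edges into them,
-- then remove empty keys) by a per-key decomposition: list the distinct events in first-occurrence
-- order, then for each event gather its successors by a fresh scan of all traces (objective: alternative).

-- ===== PORT A =====
-- one step of A's inner loop; state = (successions, prev_event)
def aStep (st : PySem.Dict String (PySem.Set String) × Option String) (event : String) :
    PySem.Dict String (PySem.Set String) × Option String :=
  let successions := st.1
  -- if event not in successions: successions[event] = set()
  let successions :=
    if !(successions.contains event) then successions.insert event PySem.Set.empty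
    else successions
  -- if prev_event != None: successions[prev_event].add(event)
  -- (prev_event is always a key here, so getD-based modify is exact for successions[prev_event])
  let successions :=
    match st.2 with
    | some prev => successions.modify prev PySem.Set.empty (fun s => PySem.Set.add s event)
    | none => successions
  (successions, some event)

def get_direct_successions (traces : List (List String)) : List (String × List String) :=
  let successions :=
    traces.foldl (fun d trace => (trace.foldl aStep (d, none)).1) PySem.Dict.empty
  -- to_remove: keys whose set is empty (key is always present, so getD is exact for successions[key])
  let to_remove :=
    successions.keys.foldl
      (fun acc key =>
        if PySem.Set.len (successions.getD key PySem.Set.empty) == 0 then acc ++ [key] else acc) []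
  -- del successions[key] (each key occurs once, so erase is exact)
  let successions := to_remove.foldl (fun d key => d.erase key) successions
  successions.items

-- ===== PORT B =====
-- succs-gathering scan of Source B: for trace in traces: for x, y in zip(trace, trace[1:]): if x == a: succs.add(y)
def bSuccsOf (traces : List (List String)) (a : String) : PySem.Set String :=
  traces.foldl
    (fun s trace =>
      (trace.zip trace.tail).foldl
        (fun s p => if p.1 == a then PySem.Set.add s p.2 else s) s)
    PySem.Set.empty

def get_direct_successions_alt (traces : List (List String)) : List (String × List String) :=
  -- events/seen loop: 'if e not in seen: seen.add(e); events.append(e)' — the events list is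
  -- exactly a PySem.Set built by Set.add
  let events : PySem.Set String :=
    traces.foldl (fun s trace => trace.foldl PySem.Set.add s) PySem.Set.empty
  -- 'for a in events: … if succs: result[a] = succs'; keys are inserted in events order and are
  -- distinct, so the result dict's items are exactly this appended list
  events.foldl
    (fun acc a =>
      let succs := bSuccsOf traces a
      if succs.isEmpty then acc else acc ++ [(a, succs)]) []

-- ===== PRECONDITION & SPEC =====
def Spec_get_direct_successions (traces : List (List String)) (out : List (String × List String)) : Prop := out = get_direct_successions_alt traces
instance (traces : List (List String)) (out : List (String × List String)) : Decidable (Spec_get_direct_successions traces out) := by unfold Spec_get_direct_successions; infer_instance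

-- ===== CLAIM (what is proved, stated in full; the proofs are below) =====
def Claim_equal_get_direct_successions : Prop := ∀ (traces : List (List String)), Dom_get_direct_successions traces → Spec_get_direct_successions traces (get_direct_successions traces)

-- ===== LEMMAS AND PROOFS =====

-- the edges A's inner loop records over a trace, given the current prev_event
def pvEdgesFrom : Option String → List String → List (String × String)
  | _, [] => []
  | none, e :: t => pvEdgesFrom (some e) t
  | some p, e :: t => (p, e) :: pvEdgesFrom (some e) t

def pvAllEdges (traces : List (List String)) : List (String × String) :=
  traces.flatMap (fun t => t.zip t.tail)

-- successors of x in an edge list, in order, with duplicates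
def pvSuccs (E : List (String × String)) (x : String) : List String :=
  (E.filter (fun p => p.1 == x)).map (fun p => p.2)

-- first-occurrence order of all events, and the successor set of an event
def pvL (traces : List (List String)) : List String :=
  PySem.Set.ofList (traces.flatMap (fun t => t))

def pvF (traces : List (List String)) (x : String) : PySem.Set String :=
  (pvSuccs (pvAllEdges traces) x).foldl PySem.Set.add PySem.Set.empty

lemma pvEdgesFrom_some (t : List String) : ∀ p, pvEdgesFrom (some p) t = (p :: t).zip t := by
  induction t with
  | nil => intro p; rfl
  | cons e t ih => intro p; simp [pvEdgesFrom, ih]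

lemma pvEdgesFrom_none (t : List String) : pvEdgesFrom none t = t.zip t.tail := by
  cases t with
  | nil => rfl
  | cons e t => simp [pvEdgesFrom, pvEdgesFrom_some]

lemma pvSuccs_append (E₁ E₂ : List (String × String)) (x : String) :
    pvSuccs (E₁ ++ E₂) x = pvSuccs E₁ x ++ pvSuccs E₂ x := by
  simp [pvSuccs, List.filter_append]

lemma pvSuccs_cons (q : String × String) (E : List (String × String)) (x : String) :
    pvSuccs (q :: E) x = (if q.1 = x then [q.2] else []) ++ pvSuccs E x := by
  by_cases h : q.1 = x <;> simp [pvSuccs, h]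

-- ---- A's loops ----

lemma pvAStep_inner (t : List String) :
    ∀ (d : PySem.Dict String (PySem.Set String)) (prev : Option String),
      (∀ p, prev = some p → d.contains p = true) →
      ((t.foldl aStep (d, prev)).1.keys = PySem.Set.update d.keys t ∧
       ∀ x, (t.foldl aStep (d, prev)).1.getD x PySem.Set.empty
          = (pvSuccs (pvEdgesFrom prev t) x).foldl PySem.Set.add (d.getD x PySem.Set.empty)) := by
  induction t with
  | nil =>
      intro d prev hp
      refine ⟨by simp [PySem.Set.update_nil], fun x => by cases prev <;> simp [pvEdgesFrom, pvSuccs]⟩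
  | cons e t ih =>
      intro d prev hp
      have hC : ∀ x, (if !(d.contains e) then d.insert e PySem.Set.empty else d).getD x PySem.Set.empty
          = d.getD x PySem.Set.empty := by
        intro x
        by_cases hc : d.contains e = true
        · simp [hc]
        · simp only [Bool.not_eq_true] at hc
          rw [if_pos (by simp [hc]), PySem.Dict.getD_insert]
          by_cases hx : x = e
          · subst hx; rw [if_pos rfl, PySem.Dict.getD_of_not_contains d _ hc]
          · rw [if_neg hx]
      have hA : (if !(d.contains e) then d.insert e PySem.Set.empty else d).contains e = true := by
        by_cases hc : d.contains e = true
        · simp [hc]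
        · simp only [Bool.not_eq_true] at hc
          rw [if_pos (by simp [hc])]
          exact PySem.Dict.contains_insert_self d e _
      have hB : (if !(d.contains e) then d.insert e PySem.Set.empty else d).keys
          = PySem.Set.add d.keys e := by
        by_cases hc : d.contains e = true
        · rw [if_neg (by simp [hc]), PySem.Set.add_of_mem ((PySem.Dict.contains_iff_mem_keys d e).1 hc)]
        · simp only [Bool.not_eq_true] at hc
          rw [if_pos (by simp [hc]), PySem.Dict.keys_insert_of_not_contains d _ hc,
            PySem.Set.add_of_not_mem
              (fun hm => by rw [(PySem.Dict.contains_iff_mem_keys d e).2 hm] at hc; cases hc)]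
      rcases prev with _ | p
      · have hstep : aStep (d, none) e
            = ((if !(d.contains e) then d.insert e PySem.Set.empty else d), some e) := by
          simp [aStep]
        rw [List.foldl_cons, hstep]
        obtain ⟨hk, hg⟩ := ih _ (some e)
          (by intro q hq; injection hq with h; subst h; exact hA)
        refine ⟨?_, ?_⟩
        · rw [hk, hB, PySem.Set.update_cons]
        · intro x
          rw [hg x, hC x]
          simp [pvEdgesFrom]
      · have hdp : d.contains p = true := hp p rfl
        have hstep : aStep (d, some p) e
            = ((if !(d.contains e) then d.insert e PySem.Set.empty else d).modify p PySem.Set.empty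
                (fun s => PySem.Set.add s e), some e) := by
          simp [aStep]
        set d1 := if !(d.contains e) then d.insert e PySem.Set.empty else d with hd1
        set d2 := d1.modify p PySem.Set.empty (fun s => PySem.Set.add s e) with hd2
        have hd1p : d1.contains p = true := by
          by_cases hc : d.contains e = true
          · simp [hd1, hc, hdp]
          · simp only [Bool.not_eq_true] at hc
            rw [hd1, if_pos (by simp [hc]), PySem.Dict.contains_insert]
            simp [hdp]
        have h2e : d2.contains e = true := by
          rw [hd2, PySem.Dict.contains_modify]; simp [hA]
        have h2k : d2.keys = PySem.Set.add d.keys e := by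
          rw [hd2, PySem.Dict.keys_modify, PySem.Dict.keys_insert_of_contains _ _ hd1p]
          exact hB
        have h2g : ∀ x, d2.getD x PySem.Set.empty
            = if x = p then PySem.Set.add (d.getD p PySem.Set.empty) e
              else d.getD x PySem.Set.empty := by
          intro x
          rw [hd2, PySem.Dict.getD_modify]
          by_cases hx : x = p
          · rw [if_pos hx, if_pos hx, hC p]
          · rw [if_neg hx, if_neg hx, hC x]
        rw [List.foldl_cons, hstep]
        obtain ⟨hk, hg⟩ := ih d2 (some e)
          (by intro q hq; injection hq with h; subst h; exact h2e)
        refine ⟨?_, ?_⟩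
        · rw [hk, h2k, PySem.Set.update_cons]
        · intro x
          rw [hg x, h2g x,
            show pvEdgesFrom (some p) (e :: t) = (p, e) :: pvEdgesFrom (some e) t from rfl,
            pvSuccs_cons]
          by_cases hx : x = p
          · subst hx; simp
          · rw [if_neg hx, if_neg (by simpa using fun h => hx h.symm)]
            simp

lemma pvA_fold (traces : List (List String)) :
    ∀ d : PySem.Dict String (PySem.Set String),
      ((traces.foldl (fun d trace => (trace.foldl aStep (d, none)).1) d).keys
          = PySem.Set.update d.keys (traces.flatMap (fun t => t)) ∧
       ∀ x, (traces.foldl (fun d trace => (trace.foldl aStep (d, none)).1) d).getD x PySem.Set.empty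
          = (pvSuccs (pvAllEdges traces) x).foldl PySem.Set.add (d.getD x PySem.Set.empty)) := by
  induction traces with
  | nil =>
      intro d
      exact ⟨by simp [PySem.Set.update_nil], fun x => by simp [pvAllEdges, pvSuccs]⟩
  | cons t ts ih =>
      intro d
      obtain ⟨hk1, hg1⟩ := pvAStep_inner t d none (by intro q hq; cases hq)
      obtain ⟨hk2, hg2⟩ := ih (t.foldl aStep (d, none)).1
      have hsplit : pvAllEdges (t :: ts) = pvEdgesFrom none t ++ pvAllEdges ts := by
        simp [pvAllEdges, pvEdgesFrom_none]
      constructor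
      · rw [List.foldl_cons, hk2, hk1, List.flatMap_cons, PySem.Set.update_append]
      · intro x
        rw [List.foldl_cons, hg2, hg1 x, hsplit, pvSuccs_append, List.foldl_append]

-- ---- assembling A ----

lemma pvEraseFold (ks : List String) :
    ∀ d : PySem.Dict String (PySem.Set String),
      (ks.foldl (fun d key => d.erase key) d).items
        = d.items.filter (fun p => !(ks.contains p.1)) := by
  induction ks with
  | nil => intro d; simp
  | cons k ks ih =>
      intro d
      rw [List.foldl_cons, ih,
        show (d.erase k).items = d.items.filter (fun p => !(p.1 == k)) from rfl,
        List.filter_filter]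
      refine List.filter_congr (fun a _ => ?_)
      by_cases h1 : a.1 = k <;> by_cases h2 : a.1 ∈ ks <;> simp [h1, h2]

lemma pvA_eq (traces : List (List String)) :
    get_direct_successions traces
      = ((pvL traces).filter (fun k => !(pvF traces k).isEmpty)).map
          (fun k => (k, pvF traces k)) := by
  obtain ⟨hAk, hAg⟩ := pvA_fold traces PySem.Dict.empty
  simp only [get_direct_successions]
  set dA := List.foldl (fun d trace => (List.foldl aStep (d, none) trace).1)
    PySem.Dict.empty traces with hdA
  have hAkeys : dA.keys = pvL traces := by
    rw [hAk]; simp [pvL, PySem.Set.update_nil_left]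
  have hAg' : ∀ x, dA.getD x PySem.Set.empty = pvF traces x := by
    intro x; rw [hAg x]; simp [pvF]
  have hnd : dA.keys.Nodup := by rw [hAkeys]; exact PySem.Set.nodup_ofList _
  have hitems : dA.items = (pvL traces).map (fun k => (k, pvF traces k)) := by
    rw [PySem.Dict.items_eq_map_keys dA hnd PySem.Set.empty, hAkeys]
    exact List.map_congr_left (fun k _ => by rw [hAg' k])
  rw [pvEraseFold]
  simp only [hAg', hAkeys, PySem.List.foldl_append_if, List.nil_append]
  rw [hitems, List.filter_map]
  refine congrArg _ (List.filter_congr fun k hk => ?_)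
  by_cases h : pvF traces k = []
  · simp [Function.comp, List.mem_filter, hk, h]
  · simp [Function.comp, List.mem_filter, h]

-- ---- B's loops ----

lemma pvBEvents_eq (traces : List (List String)) :
    ∀ s : PySem.Set String,
      traces.foldl (fun s trace => trace.foldl PySem.Set.add s) s
        = PySem.Set.update s (traces.flatMap (fun t => t)) := by
  induction traces with
  | nil => intro s; simp [PySem.Set.update_nil]
  | cons t ts ih =>
      intro s
      rw [List.foldl_cons, ih, List.flatMap_cons, PySem.Set.update_append]
      rfl

lemma pvBSuccs_inner (a : String) (l : List (String × String)) :
    ∀ s : PySem.Set String,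
      l.foldl (fun s p => if p.1 == a then PySem.Set.add s p.2 else s) s
        = (pvSuccs l a).foldl PySem.Set.add s := by
  induction l with
  | nil => intro s; simp [pvSuccs]
  | cons q l ih =>
      intro s
      rw [List.foldl_cons, ih, pvSuccs_cons]
      by_cases h : q.1 = a <;> simp [h]

lemma pvBSuccsOf_eq (traces : List (List String)) (a : String) :
    bSuccsOf traces a = pvF traces a := by
  unfold bSuccsOf pvF
  have h : ∀ (tss : List (List String)) (s : PySem.Set String),
      tss.foldl
        (fun s trace =>
          (trace.zip trace.tail).foldl
            (fun s p => if p.1 == a then PySem.Set.add s p.2 else s) s) s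
        = (pvSuccs (pvAllEdges tss) a).foldl PySem.Set.add s := by
    intro tss
    induction tss with
    | nil => intro s; simp [pvAllEdges, pvSuccs]
    | cons u us ihu =>
        intro s
        rw [List.foldl_cons, ihu, pvBSuccs_inner,
          show pvAllEdges (u :: us) = u.zip u.tail ++ pvAllEdges us from by simp [pvAllEdges],
          pvSuccs_append, List.foldl_append]
  exact h traces PySem.Set.empty

lemma pvBFoldIf (f : String → PySem.Set String) (l : List String) :
    ∀ acc : List (String × List String),
      l.foldl
        (fun acc a =>
          let succs := f a
          if succs.isEmpty then acc else acc ++ [(a, succs)]) acc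
        = acc ++ (l.filter (fun k => !(f k).isEmpty)).map (fun k => (k, f k)) := by
  induction l with
  | nil => intro acc; simp
  | cons e l ih =>
      intro acc
      rw [List.foldl_cons]
      show List.foldl
          (fun acc a =>
            let succs := f a
            if succs.isEmpty then acc else acc ++ [(a, succs)])
          (if (f e).isEmpty then acc else acc ++ [(e, f e)]) l
        = acc ++ (List.filter (fun k => !(f k).isEmpty) (e :: l)).map (fun k => (k, f k))
      by_cases h : (f e).isEmpty = true
      · rw [if_pos h, ih, List.filter_cons_of_neg (by simp [h])]
      · rw [if_neg h, ih, List.filter_cons_of_pos (by simp [h]), List.map_cons,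
          List.append_assoc, List.singleton_append]

lemma pvB_eq (traces : List (List String)) :
    get_direct_successions_alt traces
      = ((pvL traces).filter (fun k => !(pvF traces k).isEmpty)).map
          (fun k => (k, pvF traces k)) := by
  simp only [get_direct_successions_alt]
  rw [pvBEvents_eq]
  simp only [pvBSuccsOf_eq]
  rw [pvBFoldIf (pvF traces), List.nil_append]
  rw [show PySem.Set.update (PySem.Set.empty : PySem.Set String)
        (traces.flatMap (fun t => t)) = pvL traces from
        by simp [pvL, PySem.Set.update_nil_left]]

-- ===== VERDICT (by name: the statement is the Claim_ definition above) =====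
theorem get_direct_successions_spec : Claim_equal_get_direct_successions := by
  intro traces _
  show get_direct_successions traces = get_direct_successions_alt traces
  rw [pvA_eq, pvB_eq]
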